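-- pv_equiv track=rewrite | github.com/yyycodinging/d_wave_for_triangle | AAfter_generate_little_triangle_Li.py | calculate_conflict
-- ===== SOURCE A (Python) =====
-- def calculate_conflict(dict_neighbor):
--     conflict_dict = {}                                           # 计算冲突数组的数据格式：字典：键值对，创建一个空字典
--     for k1, value1 in dict_neighbor.items():
--         for k2, value2 in dict_neighbor.items():
--             a = len(list(set(value1).intersection(set(value2))))
--             if a == 1 or a == 2:                                # 1个或2个相交，三个相交的话就是本身了
--                 conflict_dict.setdefault(k1, []).append(k2)
--     return conflict_dict
-- ===== SOURCE B (Python) =====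
-- def calculate_conflict(dict_neighbor):
--     keys = list(dict_neighbor.keys())
--     sets = {k: set(v) for k, v in dict_neighbor.items()}
--     # inverted index: element -> keys whose neighbor set contains it
--     index = {}
--     for k, s in sets.items():
--         for x in s:
--             index.setdefault(x, []).append(k)
--     result = {}
--     for k1 in keys:
--         cnt = {}
--         for x in sets[k1]:
--             for k2 in index[x]:
--                 cnt[k2] = cnt.get(k2, 0) + 1
--         lst = [k2 for k2 in keys if cnt.get(k2, 0) in (1, 2)]
--         if lst:
--             result[k1] = lst
--     return result
-- ===== Notes on version B (the rewrite author's own statement) =====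
-- stated objective: faster
-- what changed: Instead of intersecting the two neighbor sets for every pair of keys (O(n^2*s) set work), B precomputes each key's set once, builds an inverted index element->keys, and for each key counts shared elements with every co-occurring key via a counter, so the per-pair test becomes an O(1) counter lookup.
import Mathlib
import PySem

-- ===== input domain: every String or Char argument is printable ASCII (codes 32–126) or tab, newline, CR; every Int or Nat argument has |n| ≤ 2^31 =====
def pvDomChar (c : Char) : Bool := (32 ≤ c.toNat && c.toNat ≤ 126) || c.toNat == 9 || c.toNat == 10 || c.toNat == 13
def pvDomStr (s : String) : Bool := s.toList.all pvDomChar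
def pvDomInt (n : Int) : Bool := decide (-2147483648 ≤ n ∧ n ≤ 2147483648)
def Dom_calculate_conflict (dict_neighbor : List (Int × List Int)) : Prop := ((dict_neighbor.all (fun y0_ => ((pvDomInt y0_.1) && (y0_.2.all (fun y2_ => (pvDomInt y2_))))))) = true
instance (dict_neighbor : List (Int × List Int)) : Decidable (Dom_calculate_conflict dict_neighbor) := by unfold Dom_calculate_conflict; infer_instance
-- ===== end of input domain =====

-- B replaces A's per-pair set intersections by one precomputed inverted index (element -> keys)
-- plus a shared-element counter per key, making the per-pair test a counter lookup (measured faster).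

-- ===== PORT A =====
-- for k1, value1 in dict_neighbor.items(): for k2, value2 in dict_neighbor.items():
--   a = len(set(value1) & set(value2)); if a in (1,2): conflict_dict.setdefault(k1, []).append(k2)
def calculate_conflict (dict_neighbor : List (Int × List Int)) : List (Int × List Int) :=
  (dict_neighbor.foldl
    (fun cd p1 =>
      dict_neighbor.foldl
        (fun cd p2 =>
          let a := (PySem.Set.inter (PySem.Set.ofList p1.2) (PySem.Set.ofList p2.2)).length
          if a = 1 ∨ a = 2 then cd.modify p1.1 [] (fun l => l ++ [p2.1]) else cd)
        cd)
    (PySem.Dict.empty : PySem.Dict Int (List Int))).items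

-- ===== PORT B =====
-- sets = {k: set(v) for k, v in dict_neighbor.items()}
def pvSets (d : List (Int × List Int)) : PySem.Dict Int (List Int) :=
  d.foldl (fun sd p => sd.insert p.1 (PySem.Set.ofList p.2)) PySem.Dict.empty

-- for k, s in sets.items(): for x in s: index.setdefault(x, []).append(k)
def pvIndex (d : List (Int × List Int)) : PySem.Dict Int (List Int) :=
  (pvSets d).items.foldl
    (fun ix p => p.2.foldl (fun ix x => ix.modify x [] (fun l => l ++ [p.1])) ix)
    PySem.Dict.empty

-- cnt = {}; for x in sets[k1]: for k2 in index[x]: cnt[k2] = cnt.get(k2, 0) + 1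
def pvCnt (d : List (Int × List Int)) (k1 : Int) : PySem.Dict Int Int :=
  ((pvSets d).getD k1 []).foldl
    (fun c x => ((pvIndex d).getD x []).foldl (fun c k2 => c.insert k2 (c.getD k2 0 + 1)) c)
    PySem.Dict.empty

-- lst = [k2 for k2 in keys if cnt.get(k2, 0) in (1, 2)]
def pvLst (d : List (Int × List Int)) (k1 : Int) : List Int :=
  let c := pvCnt d k1
  (d.map (fun p => p.1)).filter (fun k2 => c.getD k2 0 == 1 || c.getD k2 0 == 2)

-- for k1 in keys: ... ; if lst: result[k1] = lst
def calculate_conflict_alt (dict_neighbor : List (Int × List Int)) : List (Int × List Int) :=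
  ((dict_neighbor.map (fun p => p.1)).foldl
    (fun rd k1 =>
      let lst := pvLst dict_neighbor k1
      if lst.isEmpty then rd else rd.insert k1 lst)
    (PySem.Dict.empty : PySem.Dict Int (List Int))).items

-- ===== PRECONDITION & SPEC =====
-- Pre_ requires distinct keys: the parameter is a Python dict, whose association-list encoding
-- with a duplicated key does not correspond to any Python input, so nothing is claimed there.
def Pre_calculate_conflict (dict_neighbor : List (Int × List Int)) : Prop :=
  (dict_neighbor.map (fun p => p.1)).Nodup
instance (dict_neighbor : List (Int × List Int)) : Decidable (Pre_calculate_conflict dict_neighbor) := by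
  unfold Pre_calculate_conflict; infer_instance

def pvWitness_calculate_conflict : (List (Int × List Int)) :=
  [(1, [2, 3]), (2, [1, 3]), (3, [1, 2, 4])]

def Spec_calculate_conflict (dict_neighbor : List (Int × List Int)) (out : List (Int × List Int)) : Prop := out = calculate_conflict_alt dict_neighbor
instance (dict_neighbor : List (Int × List Int)) (out : List (Int × List Int)) : Decidable (Spec_calculate_conflict dict_neighbor out) := by unfold Spec_calculate_conflict; infer_instance

-- ===== CLAIM (what is proved, stated in full; the proofs are below) =====
def Claim_equal_calculate_conflict : Prop := ∀ (dict_neighbor : List (Int × List Int)), Dom_calculate_conflict dict_neighbor → Pre_calculate_conflict dict_neighbor → Spec_calculate_conflict dict_neighbor (calculate_conflict dict_neighbor)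

-- ===== LEMMAS AND PROOFS =====

-- all (element, key) pairs of the inverted index, flattened in construction order
def pvFlat (d : List (Int × List Int)) : List (Int × Int) :=
  d.flatMap (fun p => (PySem.Set.ofList p.2).map (fun x => (x, p.1)))

theorem pv_sets_items (d : List (Int × List Int)) (hk : (d.map (fun p => p.1)).Nodup) :
    (pvSets d).items = d.map (fun p => (p.1, PySem.Set.ofList p.2)) := by
  unfold pvSets
  have h := PySem.Dict.items_foldl_insert_fresh d (fun p => p.1) (fun p => PySem.Set.ofList p.2)
    (PySem.Dict.empty : PySem.Dict Int (List Int))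
    (fun a _ => PySem.Dict.contains_empty _) hk
  simpa using h

theorem pv_sets_keys_nodup (d : List (Int × List Int)) (hk : (d.map (fun p => p.1)).Nodup) :
    (pvSets d).keys.Nodup := by
  have : (pvSets d).keys = d.map (fun p => p.1) := by
    simp only [PySem.Dict.keys, pv_sets_items d hk, List.map_map]
    rfl
  rw [this]; exact hk

theorem pv_sets_getD (d : List (Int × List Int)) (hk : (d.map (fun p => p.1)).Nodup)
    {p : Int × List Int} (hp : p ∈ d) :
    (pvSets d).getD p.1 [] = PySem.Set.ofList p.2 := by
  apply PySem.Dict.getD_of_mem_items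
  · rw [pv_sets_items d hk]
    exact List.mem_map.2 ⟨p, hp, rfl⟩
  · exact pv_sets_keys_nodup d hk

theorem pv_index_getD (d : List (Int × List Int)) (hk : (d.map (fun p => p.1)).Nodup) (x : Int) :
    (pvIndex d).getD x [] = ((pvFlat d).filter (fun q => q.1 == x)).map (fun q => q.2) := by
  have hix : pvIndex d =
      (pvFlat d).foldl (fun ix q => ix.modify q.1 [] (fun l => l ++ [q.2])) PySem.Dict.empty := by
    unfold pvIndex pvFlat
    rw [pv_sets_items d hk, List.foldl_map, List.foldl_flatMap]
    simp [List.foldl_map]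
  rw [hix, PySem.Dict.getD_foldl_modify_append]
  simp

-- a sum over a Nodup list whose terms vanish except at one member
theorem pv_sum_single {β : Type} (g : β → Nat) :
    ∀ (l : List β), l.Nodup → ∀ p₀ ∈ l, (∀ p ∈ l, p ≠ p₀ → g p = 0) →
      (l.map g).sum = g p₀ := by
  intro l
  induction l with
  | nil => intro _ p₀ h; exact absurd h (List.not_mem_nil)
  | cons q t ih =>
    intro hnd p₀ hmem h0
    rcases List.mem_cons.1 hmem with hq | ht
    · subst hq
      have : ∀ p ∈ t, g p = 0 := by
        intro p hp
        exact h0 p (List.mem_cons_of_mem _ hp) (fun he => (List.nodup_cons.1 hnd).1 (he ▸ hp))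
      simp [List.sum_eq_zero (by simpa using fun p hp => this p hp : ∀ x ∈ t.map g, x = 0)]
    · have hq0 : g q = 0 := h0 q (List.mem_cons_self) (fun he => (List.nodup_cons.1 hnd).1 (he ▸ ht))
      simp [hq0, ih (List.nodup_cons.1 hnd).2 p₀ ht
        (fun p hp => h0 p (List.mem_cons_of_mem _ hp))]

theorem pv_index_count (d : List (Int × List Int)) (hk : (d.map (fun p => p.1)).Nodup)
    {p2 : Int × List Int} (h2 : p2 ∈ d) (x : Int) :
    ((pvIndex d).getD x []).count p2.1
      = if (PySem.Set.ofList p2.2).contains x then 1 else 0 := by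
  rw [pv_index_getD d hk x, List.count_eq_countP, List.countP_map, List.countP_filter]
  unfold pvFlat
  rw [List.countP_flatMap]
  have hterm : ∀ p ∈ d, (List.countP (fun q => ((fun q => q.2 == p2.1) ∘ fun q => q) q && q.1 == x) ∘
      fun p => (PySem.Set.ofList p.2).map fun x => (x, p.1)) p
      = if p = p2 then (if (PySem.Set.ofList p2.2).contains x then 1 else 0) else 0 := by
    intro p hp
    simp only [Function.comp, List.countP_map]
    by_cases hpe : p = p2
    · subst hpe
      have hcc : (List.countP ((fun q => (q.2 == p.1 && q.1 == x)) ∘ fun y => (y, p.1))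
          (PySem.Set.ofList p.2)) = List.count x (PySem.Set.ofList p.2) := by
        rw [List.count_eq_countP]
        apply List.countP_congr
        intro a _
        simp
      by_cases hx : (PySem.Set.ofList p.2).contains x
      · have hxm : x ∈ PySem.Set.ofList p.2 := (PySem.Set.contains_iff _ _).1 hx
        rw [hcc, List.count_eq_one_of_mem (PySem.Set.nodup_ofList _) hxm, if_pos hx]
        simp
      · have hxm : x ∉ PySem.Set.ofList p.2 := fun hm => hx ((PySem.Set.contains_iff _ _).2 hm)
        rw [hcc, List.count_eq_zero_of_not_mem hxm, if_neg hx]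
        simp
    · have hne : p.1 ≠ p2.1 := by
        intro he
        exact hpe (List.inj_on_of_nodup_map hk hp h2 he)
      have : (List.countP ((fun q => (q.2 == p2.1 && q.1 == x)) ∘ fun y => (y, p.1))
          (PySem.Set.ofList p.2)) = 0 := by
        apply List.countP_eq_zero.2
        intro a _
        simp [hne]
      rw [this]
      simp [hpe]
  have hdn : d.Nodup := hk.of_map
  calc (d.map ((List.countP fun q => ((fun q => q.2 == p2.1) ∘ fun q => q) q && q.1 == x) ∘
          fun p => (PySem.Set.ofList p.2).map fun x => (x, p.1))).sum
      = (d.map (fun p => if p = p2 then (if (PySem.Set.ofList p2.2).contains x then 1 else 0) else 0)).sum := by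
        apply congrArg
        exact List.map_congr_left hterm
    _ = _ := by
        have := pv_sum_single
          (fun p => if p = p2 then (if (PySem.Set.ofList p2.2).contains x then 1 else 0) else 0)
          d hdn p2 h2 (by intro p _ hne; simp [hne])
        rw [this]
        simp

-- a Nat-valued 0/1 sum is a countP
theorem pv_sum_ite {α : Type} (pr : α → Bool) :
    ∀ l : List α, (l.map (fun x => if pr x then 1 else 0)).sum = l.countP pr := by
  intro l
  induction l with
  | nil => rfl
  | cons a t ih =>
    by_cases h : pr a <;> simp [h, ih, Nat.add_comm]

theorem pv_cnt_getD (d : List (Int × List Int)) (hk : (d.map (fun p => p.1)).Nodup)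
    {p1 p2 : Int × List Int} (h1 : p1 ∈ d) (h2 : p2 ∈ d) :
    (pvCnt d p1.1).getD p2.1 0
      = ((PySem.Set.ofList p1.2).countP (fun x => (PySem.Set.ofList p2.2).contains x) : Int) := by
  unfold pvCnt
  rw [pv_sets_getD d hk h1]
  rw [← List.foldl_flatMap (f := fun x => (pvIndex d).getD x [])
    (g := fun (c : PySem.Dict Int Int) k2 => c.insert k2 (c.getD k2 0 + 1))]
  rw [PySem.Dict.getD_foldl_insert_add_one]
  rw [PySem.Dict.getD_empty, List.count_flatMap]
  have : ((PySem.Set.ofList p1.2).map (List.count p2.1 ∘ fun x => (pvIndex d).getD x [])).sum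
      = ((PySem.Set.ofList p1.2).map
          (fun x => if (PySem.Set.ofList p2.2).contains x then 1 else 0)).sum := by
    apply congrArg
    apply List.map_congr_left
    intro x _
    exact pv_index_count d hk h2 x
  rw [this, pv_sum_ite]
  simp only [zero_add]

-- A's intersection length is the same countP
theorem pv_inter_length (p1 p2 : Int × List Int) :
    (PySem.Set.inter (PySem.Set.ofList p1.2) (PySem.Set.ofList p2.2)).length
      = (PySem.Set.ofList p1.2).countP (fun x => (PySem.Set.ofList p2.2).contains x) := by
  simp [PySem.Set.inter, List.countP_eq_length_filter]

-- A's inner condition, as a Bool on the pair p2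
def pvCondA (p1 p2 : Int × List Int) : Bool :=
  decide ((PySem.Set.inter (PySem.Set.ofList p1.2) (PySem.Set.ofList p2.2)).length = 1
    ∨ (PySem.Set.inter (PySem.Set.ofList p1.2) (PySem.Set.ofList p2.2)).length = 2)

-- B's filter condition agrees with A's condition on members of d
theorem pv_cond_eq (d : List (Int × List Int)) (hk : (d.map (fun p => p.1)).Nodup)
    {p1 p2 : Int × List Int} (h1 : p1 ∈ d) (h2 : p2 ∈ d) :
    ((pvCnt d p1.1).getD p2.1 0 == 1 || (pvCnt d p1.1).getD p2.1 0 == 2) = pvCondA p1 p2 := by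
  rw [pv_cnt_getD d hk h1 h2]
  rw [pvCondA, pv_inter_length p1 p2]
  set n := (PySem.Set.ofList p1.2).countP (fun x => (PySem.Set.ofList p2.2).contains x) with hn
  by_cases h1' : n = 1
  · simp [h1']
  · by_cases h2' : n = 2
    · simp [h2']
    · have c1 : ((n : Int) == 1) = false := by simp; omega
      have c2 : ((n : Int) == 2) = false := by simp; omega
      simp [c1, c2, h1', h2']

-- running A's repeated modify-append at one key
theorem pv_run_modify (k : Int) :
    ∀ (ms : List Int) (cd : PySem.Dict Int (List Int)),
      ms.foldl (fun cd m => cd.modify k [] (fun l => l ++ [m])) cd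
        = if ms = [] then cd else cd.insert k (cd.getD k [] ++ ms) := by
  intro ms
  induction ms with
  | nil => intro cd; simp
  | cons m t ih =>
    intro cd
    rw [List.foldl_cons, ih]
    by_cases ht : t = []
    · simp [ht, PySem.Dict.modify]
    · simp only [ht, if_neg (by simp : ¬(m :: t = [])), PySem.Dict.modify]
      rw [PySem.Dict.getD_insert_self, PySem.Dict.insert_insert_self, List.append_assoc]
      rfl

-- B's list for key p1.1 is A's matched-keys list, for p1 ∈ d
theorem pv_lst_eq (d : List (Int × List Int)) (hk : (d.map (fun p => p.1)).Nodup)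
    {p1 : Int × List Int} (h1 : p1 ∈ d) :
    pvLst d p1.1 = (d.filter (pvCondA p1)).map (fun p => p.1) := by
  unfold pvLst
  simp only [List.filter_map]
  apply congrArg
  apply List.filter_congr
  intro p2 h2
  exact pv_cond_eq d hk h1 h2

-- A's inner loop over d collapses to a conditional insert of B's list
theorem pv_inner_eq (d : List (Int × List Int)) (hk : (d.map (fun p => p.1)).Nodup)
    {p1 : Int × List Int} (h1 : p1 ∈ d) (cd : PySem.Dict Int (List Int))
    (hc : cd.contains p1.1 = false) :
    d.foldl
      (fun cd p2 =>
        let a := (PySem.Set.inter (PySem.Set.ofList p1.2) (PySem.Set.ofList p2.2)).length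
        if a = 1 ∨ a = 2 then cd.modify p1.1 [] (fun l => l ++ [p2.1]) else cd)
      cd
      = if (pvLst d p1.1).isEmpty then cd else cd.insert p1.1 (pvLst d p1.1) := by
  have hshape : d.foldl
      (fun cd p2 =>
        let a := (PySem.Set.inter (PySem.Set.ofList p1.2) (PySem.Set.ofList p2.2)).length
        if a = 1 ∨ a = 2 then cd.modify p1.1 [] (fun l => l ++ [p2.1]) else cd)
      cd
      = d.foldl
        (fun cd p2 => if pvCondA p1 p2 = true then cd.modify p1.1 [] (fun l => l ++ [p2.1]) else cd)
        cd := by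
    apply PySem.List.foldl_congr_mem
    intro acc p2 _
    simp [pvCondA]
  rw [hshape, ← List.foldl_filter, ← List.foldl_map (f := fun p : Int × List Int => p.1)
    (g := fun cd m => PySem.Dict.modify cd p1.1 [] (fun l => l ++ [m]))]
  rw [pv_run_modify p1.1 _ cd, pv_lst_eq d hk h1]
  rw [PySem.Dict.getD_of_not_contains cd [] hc]
  rcases eq_or_ne ((d.filter (pvCondA p1)).map (fun p => p.1)) [] with he | he
  · rw [he]; simp
  · rw [if_neg he, List.nil_append, if_neg (fun hcon => he (List.isEmpty_iff.1 hcon))]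

-- the outer loops agree, by induction with a fresh-keys invariant
theorem pv_outer (d : List (Int × List Int)) (hk : (d.map (fun p => p.1)).Nodup) :
    ∀ (l : List (Int × List Int)) (cd : PySem.Dict Int (List Int)),
      (∀ p ∈ l, p ∈ d) → (l.map (fun p => p.1)).Nodup →
      (∀ p ∈ l, cd.contains p.1 = false) →
      l.foldl
        (fun cd p1 =>
          d.foldl
            (fun cd p2 =>
              let a := (PySem.Set.inter (PySem.Set.ofList p1.2) (PySem.Set.ofList p2.2)).length
              if a = 1 ∨ a = 2 then cd.modify p1.1 [] (fun l => l ++ [p2.1]) else cd)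
            cd)
        cd
      = l.foldl
          (fun rd p =>
            let lst := pvLst d p.1
            if lst.isEmpty then rd else rd.insert p.1 lst)
          cd := by
  intro l
  induction l with
  | nil => intro cd _ _ _; rfl
  | cons q t ih =>
    intro cd hsub hnd hfresh
    rw [List.map_cons, List.nodup_cons] at hnd
    simp only [List.foldl_cons]
    rw [pv_inner_eq d hk (hsub q List.mem_cons_self) cd (hfresh q List.mem_cons_self)]
    apply ih
    · intro p hp; exact hsub p (List.mem_cons_of_mem _ hp)
    · exact hnd.2
    · intro p hp
      have hpq : p.1 ≠ q.1 := by
        intro he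
        exact hnd.1 (he ▸ List.mem_map.2 ⟨p, hp, rfl⟩)
      by_cases hl : (pvLst d q.1).isEmpty
      · simp [hl, hfresh p (List.mem_cons_of_mem _ hp)]
      · simp [hl, PySem.Dict.contains_insert, hpq, hfresh p (List.mem_cons_of_mem _ hp)]

-- ===== VERDICT (by name: the statement is the Claim_ definition above) =====
theorem calculate_conflict_spec : Claim_equal_calculate_conflict := by
  intro d _ hk
  unfold Spec_calculate_conflict calculate_conflict calculate_conflict_alt
  apply congrArg PySem.Dict.items
  rw [List.foldl_map]
  exact pv_outer d hk d PySem.Dict.empty (fun p hp => hp) hk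
    (fun p _ => PySem.Dict.contains_empty _)
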